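-- pv_equiv track=rewrite | github.com/pffijt/artificial-intelligence | GeneticAlgorithm MaxOne.py | getCumSummation
-- ===== SOURCE A (Python) =====
-- def getCumSummation(population):
--     sumCumList = []  # Sums of each bitlist
--     for i in range(len(population)):
--         if(i > 0):
--             # Adds previous element to make list cumalative
--             sumCumList.append(sum(population[i])+sumCumList[i-1])
--         else:
--             sumCumList.append(sum(population[i]))
--     return sumCumList
-- ===== SOURCE B (Python) =====
-- def getCumSummation(population):
--     # Build the result back-to-front: walk the rows in reverse; each new row's
--     # sum becomes the new head and is also added onto every entry built so far.
--     out = []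
--     for row in reversed(population):
--         h = sum(row)
--         out = [h] + [h + x for x in out]
--     return out
-- ===== Notes on version B (the rewrite author's own statement) =====
-- stated objective: alternative
-- what changed: Instead of a forward indexed loop appending sum(row)+previous output entry, B builds the result back-to-front: it walks the rows in reverse and at each step prepends the row sum while adding it onto every entry constructed so far (cumsum(r::rs) = sum(r) :: map(+sum(r), cumsum(rs))).
import Mathlib
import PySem

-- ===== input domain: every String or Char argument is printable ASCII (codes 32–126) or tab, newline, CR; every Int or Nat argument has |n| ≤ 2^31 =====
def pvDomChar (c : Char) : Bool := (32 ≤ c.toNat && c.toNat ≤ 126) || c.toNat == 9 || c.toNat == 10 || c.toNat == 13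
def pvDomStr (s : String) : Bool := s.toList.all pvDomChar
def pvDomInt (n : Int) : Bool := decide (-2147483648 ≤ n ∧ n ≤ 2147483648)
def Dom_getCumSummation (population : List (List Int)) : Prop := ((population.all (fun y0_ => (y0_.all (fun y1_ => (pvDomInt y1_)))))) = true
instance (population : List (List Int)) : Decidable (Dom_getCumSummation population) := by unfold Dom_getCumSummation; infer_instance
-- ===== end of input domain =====

-- B builds the result back-to-front (reverse walk, prepend row sum and shift prior
-- entries by it) instead of A's forward indexed loop with a back-index into the output.


-- ===== PORT A =====
def getCumSummation (population : List (List Int)) : List Int :=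
  (PySem.List.pyRange 0 population.length 1).foldl
    (fun sumCumList i =>
      if i > 0 then
        sumCumList ++ [(PySem.List.pyGetD population i []).sum + PySem.List.pyGetD sumCumList (i - 1) 0]
      else
        sumCumList ++ [(PySem.List.pyGetD population i []).sum]) []

-- ===== PORT B =====
def getCumSummation_alt (population : List (List Int)) : List Int :=
  population.reverse.foldl
    (fun out row =>
      let h := row.sum
      h :: out.map (fun x => h + x)) []

-- ===== PRECONDITION & SPEC =====
def Spec_getCumSummation (population : List (List Int)) (out : List Int) : Prop := out = getCumSummation_alt population
instance (population : List (List Int)) (out : List Int) : Decidable (Spec_getCumSummation population out) := by unfold Spec_getCumSummation; infer_instance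

-- ===== CLAIM (what is proved, stated in full; the proofs are below) =====
def Claim_equal_getCumSummation : Prop := ∀ (population : List (List Int)), Dom_getCumSummation population → Spec_getCumSummation population (getCumSummation population)

-- ===== LEMMAS AND PROOFS =====

-- proof-side running-total form, bridging A's forward loop and B's backward build
def pyAcc (t : Int) : List Int → List Int
  | [] => []
  | s :: ss => (t + s) :: pyAcc (t + s) ss

theorem pyAcc_length (t : Int) (s : List Int) : (pyAcc t s).length = s.length := by
  induction s generalizing t with
  | nil => rfl
  | cons x xs ih => simp [pyAcc, ih]

theorem pyAcc_append_singleton (t y : Int) (s : List Int) :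
    pyAcc t (s ++ [y]) = pyAcc t s ++ [t + s.sum + y] := by
  induction s generalizing t with
  | nil => simp [pyAcc]
  | cons x xs ih => simp [pyAcc, ih, add_assoc]

theorem pyAcc_getLast? (t : Int) (s : List Int) (h : s ≠ []) :
    (pyAcc t s).getLast? = some (t + s.sum) := by
  induction s generalizing t with
  | nil => exact absurd rfl h
  | cons x xs ih =>
    cases xs with
    | nil => simp [pyAcc]
    | cons z zs =>
      rw [pyAcc, pyAcc, List.getLast?_cons_cons, ← pyAcc]
      rw [ih _ (by simp)]
      simp [add_assoc]

theorem getCumSummation_eq_pyAcc (population : List (List Int)) :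
    getCumSummation population = pyAcc 0 (population.map List.sum) := by
  induction population using List.reverseRecOn with
  | nil => rfl
  | append_singleton xs y ih =>
    unfold getCumSummation at *
    have hlen : ((xs ++ [y]).length : Int) = (xs.length : Int) + 1 := by
      simp
    rw [hlen, PySem.List.pyRange_one_succ_right (by positivity), List.foldl_append]
    have hpref :
        (PySem.List.pyRange 0 (xs.length : Int) 1).foldl
          (fun sumCumList i =>
            if i > 0 then
              sumCumList ++ [(PySem.List.pyGetD (xs ++ [y]) i []).sum + PySem.List.pyGetD sumCumList (i - 1) 0]
            else
              sumCumList ++ [(PySem.List.pyGetD (xs ++ [y]) i []).sum]) [] =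
        (PySem.List.pyRange 0 (xs.length : Int) 1).foldl
          (fun sumCumList i =>
            if i > 0 then
              sumCumList ++ [(PySem.List.pyGetD xs i []).sum + PySem.List.pyGetD sumCumList (i - 1) 0]
            else
              sumCumList ++ [(PySem.List.pyGetD xs i []).sum]) [] := by
      apply PySem.List.foldl_congr_mem
      intro acc i hi
      rw [PySem.List.mem_pyRange_one] at hi
      have hget : PySem.List.pyGetD (xs ++ [y]) i [] = PySem.List.pyGetD xs i [] := by
        rw [PySem.List.pyGetD_eq_getElem _ [] hi.1 (by simp; omega),
            PySem.List.pyGetD_eq_getElem _ [] hi.1 (by omega)]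
        exact List.getElem_append_left (by omega)
      rw [hget]
    rw [hpref, ih]
    simp only [List.map_append, List.map_cons, List.map_nil,
      pyAcc_append_singleton, List.foldl_cons, List.foldl_nil]
    by_cases h0 : xs = []
    · subst h0
      simp [pyAcc]
    · have hpos : (0 : Int) < (xs.length : Int) := by
        have := List.length_pos_iff.mpr h0
        exact_mod_cast this
      rw [if_pos hpos]
      congr 1
      have hlast : PySem.List.pyGetD (pyAcc 0 (xs.map List.sum)) ((xs.length : Int) - 1) 0
          = 0 + (xs.map List.sum).sum := by
        have hl := pyAcc_length 0 (xs.map List.sum)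
        rw [PySem.List.pyGetD_eq_getElem _ 0 (by omega)
            (by rw [pyAcc_length]; simp)]
        rw [List.getElem_eq_iff]
        have hidx : ((xs.length : Int) - 1).toNat = (pyAcc 0 (xs.map List.sum)).length - 1 := by
          rw [pyAcc_length]
          simp
        rw [hidx, ← List.getLast?_eq_getElem?]
        exact pyAcc_getLast? 0 (xs.map List.sum) (by simpa using h0)
      rw [hlast]
      have hget : PySem.List.pyGetD (xs ++ [y]) (xs.length : Int) [] = y := by
        rw [PySem.List.pyGetD_eq_getElem _ [] (by positivity) (by simp)]
        simp
      rw [hget]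
      simp [add_comm]

-- B's backward fold, written as a foldr (shift-and-add form)
def cumShift : List Int → List Int
  | [] => []
  | x :: xs => x :: (cumShift xs).map (fun z => x + z)

theorem pyAcc_eq_map_cumShift (t : Int) (l : List Int) :
    pyAcc t l = (cumShift l).map (fun z => t + z) := by
  induction l generalizing t with
  | nil => rfl
  | cons x xs ih =>
    simp only [pyAcc, cumShift, List.map_cons, List.map_map, ih]
    congr 1
    apply List.map_congr_left
    intro z _
    simp [Function.comp, add_assoc]

theorem alt_eq_cumShift (population : List (List Int)) :
    getCumSummation_alt population = cumShift (population.map List.sum) := by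
  unfold getCumSummation_alt
  rw [List.foldl_reverse]
  induction population with
  | nil => rfl
  | cons r rs ih =>
    simp only [List.foldr_cons, List.map_cons, cumShift, ih]

theorem getCumSummation_eq_alt (population : List (List Int)) :
    getCumSummation population = getCumSummation_alt population := by
  rw [getCumSummation_eq_pyAcc, alt_eq_cumShift,
      pyAcc_eq_map_cumShift]
  simp

-- ===== VERDICT (by name: the statement is the Claim_ definition above) =====
theorem getCumSummation_spec : Claim_equal_getCumSummation := by
  intro population _
  exact getCumSummation_eq_alt population
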